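-- pv_equiv track=rewrite | github.com/route250/carrier-war-vs | server/services/hexmap.py | encode_map
-- ===== SOURCE A (Python) =====
-- def encode_map( raw_map: list[list[int]] ) -> dict[int, list[tuple[int,int,int]]]:
--     """
--     ヘックスマップを圧縮して辞書形式で返す。
--     キーは、行番号、値はその行の陸地セルの列範囲と値(s,e,value)タプルのリスト。
--     """
--     encoded: dict[int,list[tuple[int,int,int]]] = {}
--     for y, row in enumerate(raw_map):
--         ranges = []
--         start = -1
--         current_value = 0
--         for x, cell in enumerate(row):
--             if cell != current_value:
--                 if start >= 0:
--                     ranges.append((start, x - 1, current_value))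
--                 if cell != 0:
--                     start = x
--                     current_value = cell
--                 else:
--                     start = -1
--                     current_value = 0
--         if current_value != 0 and start >= 0:
--             ranges.append((start, len(row) - 1,current_value))
--         if ranges:
--             encoded[y] = ranges
--     return encoded
-- ===== SOURCE B (Python) =====
-- def encode_map(raw_map):
--     """Run-length encode land cells per map row: two-pointer run scanner
--     (find each maximal run of equal cells directly), no start/current_value
--     state machine and no closing step after the loop."""
--     encoded = {}
--     for y, row in enumerate(raw_map):
--         ranges = []
--         x = 0
--         n = len(row)
--         while x < n:
--             v = row[x]
--             e = x + 1
--             while e < n and row[e] == v: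
--                 e += 1
--             if v != 0:
--                 ranges.append((x, e - 1, v))
--             x = e
--         if ranges:
--             encoded[y] = ranges
--     return encoded
-- ===== Notes on version B (the rewrite author's own statement) =====
-- stated objective: alternative
-- what changed: Replaced A's per-cell state machine (start/current_value carried across cells plus a post-loop closing append) with a two-pointer scanner that locates each maximal run of equal cells directly and emits its range in one step.
import Mathlib
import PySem

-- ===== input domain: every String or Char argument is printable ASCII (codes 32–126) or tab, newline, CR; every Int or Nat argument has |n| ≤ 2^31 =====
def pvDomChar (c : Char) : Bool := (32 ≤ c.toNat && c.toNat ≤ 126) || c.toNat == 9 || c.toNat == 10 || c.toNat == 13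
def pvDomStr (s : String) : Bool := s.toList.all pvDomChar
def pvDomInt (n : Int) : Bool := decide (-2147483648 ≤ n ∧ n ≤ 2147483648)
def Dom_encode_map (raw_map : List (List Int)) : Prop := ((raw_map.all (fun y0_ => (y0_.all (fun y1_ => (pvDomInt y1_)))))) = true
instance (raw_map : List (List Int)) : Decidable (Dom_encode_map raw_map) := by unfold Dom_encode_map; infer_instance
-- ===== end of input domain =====

-- B replaces A's start/current_value state machine by a two-pointer maximal-run
-- scanner (objective: alternative, same cost); return values are proved equal.

-- ===== PORT A =====
-- inner-loop body of A: state = (ranges, start, current_value), input = (x, cell)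
def encMapStepA (st : List (Int × Int × Int) × Int × Int) (p : Int × Int) :
    List (Int × Int × Int) × Int × Int :=
  if p.2 ≠ st.2.2 then
    let ranges := if st.2.1 ≥ 0 then st.1 ++ [(st.2.1, p.1 - 1, st.2.2)] else st.1
    if p.2 ≠ 0 then (ranges, p.1, p.2) else (ranges, -1, 0)
  else st

-- one row of A: the enumerate loop, then the closing append after the loop
def encMapRowA (row : List Int) : List (Int × Int × Int) :=
  let st := (PySem.List.enumerate row).foldl encMapStepA ([], -1, 0)
  if st.2.2 ≠ 0 ∧ st.2.1 ≥ 0 then st.1 ++ [(st.2.1, (row.length : Int) - 1, st.2.2)] else st.1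

def encode_map (raw_map : List (List Int)) : List (Int × List (Int × Int × Int)) :=
  ((PySem.List.enumerate raw_map).foldl
    (fun d p => if encMapRowA p.2 ≠ [] then d.insert p.1 (encMapRowA p.2) else d)
    (PySem.Dict.empty : PySem.Dict Int (List (Int × Int × Int)))).items

-- ===== PORT B =====
-- Source B's while loop: x points at the start of a maximal run, the inner while
-- (here: takeWhile/dropWhile on the tail) finds its end e, emit if nonzero, jump to e
def encMapRowB (x : Int) : List Int → List (Int × Int × Int)
  | [] => []
  | v :: cs =>
      let e := x + 1 + (cs.takeWhile (· == v)).length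
      (if v ≠ 0 then [(x, e - 1, v)] else []) ++ encMapRowB e (cs.dropWhile (· == v))
termination_by l => l.length
decreasing_by
  simpa using Nat.lt_succ_of_le (List.length_dropWhile_le _ _)

def encode_map_alt (raw_map : List (List Int)) : List (Int × List (Int × Int × Int)) :=
  ((PySem.List.enumerate raw_map).foldl
    (fun d p => if encMapRowB 0 p.2 ≠ [] then d.insert p.1 (encMapRowB 0 p.2) else d)
    (PySem.Dict.empty : PySem.Dict Int (List (Int × Int × Int)))).items

-- ===== PRECONDITION & SPEC =====
def Spec_encode_map (raw_map : List (List Int)) (out : List (Int × List (Int × Int × Int))) : Prop := out = encode_map_alt raw_map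
instance (raw_map : List (List Int)) (out : List (Int × List (Int × Int × Int))) : Decidable (Spec_encode_map raw_map out) := by unfold Spec_encode_map; infer_instance

-- ===== CLAIM (what is proved, stated in full; the proofs are below) =====
def Claim_equal_encode_map : Prop := ∀ (raw_map : List (List Int)), Dom_encode_map raw_map → Spec_encode_map raw_map (encode_map raw_map)

-- ===== LEMMAS AND PROOFS =====

-- the closing step of A's row loop, abstracted over the row-length end index
def encMapFinishA (xe : Int) (st : List (Int × Int × Int) × Int × Int) : List (Int × Int × Int) :=
  if st.2.2 ≠ 0 ∧ st.2.1 ≥ 0 then st.1 ++ [(st.2.1, xe - 1, st.2.2)] else st.1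

-- the four reachable transitions of A's inner-loop body
theorem stepA_same (ranges : List (Int × Int × Int)) (s v x : Int) :
    encMapStepA (ranges, s, v) (x, v) = (ranges, s, v) := by
  simp [encMapStepA]

theorem stepA_fresh (ranges : List (Int × Int × Int)) (x c : Int) (hc : c ≠ 0) :
    encMapStepA (ranges, -1, 0) (x, c) = (ranges, x, c) := by
  simp [encMapStepA, hc]

theorem stepA_close_zero (ranges : List (Int × Int × Int)) (x s v : Int)
    (hv : v ≠ 0) (hs : 0 ≤ s) :
    encMapStepA (ranges, s, v) (x, 0) = (ranges ++ [(s, x - 1, v)], -1, 0) := by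
  simp [encMapStepA, Ne.symm hv, hs]

theorem stepA_close_new (ranges : List (Int × Int × Int)) (x s v c : Int)
    (hcv : c ≠ v) (hc : c ≠ 0) (hs : 0 ≤ s) :
    encMapStepA (ranges, s, v) (x, c) = (ranges ++ [(s, x - 1, v)], x, c) := by
  simp [encMapStepA, hcv, hc, hs]

-- B started at a cell whose preceding maximal zero-run it would skip gives the same output
theorem encMapRowB_skip_zeros (x : Int) (cs : List Int) :
    encMapRowB x cs =
      encMapRowB (x + ((cs.takeWhile (· == (0:Int))).length : Int))
        (cs.dropWhile (· == (0:Int))) := by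
  match cs with
  | [] => simp [encMapRowB]
  | c :: cs' =>
    by_cases h : c = 0
    · subst h
      rw [encMapRowB]
      simp [List.takeWhile, List.dropWhile]
      try push_cast
      try ring_nf
    · have hb : ((c == (0:Int)) = false) := by simpa using h
      simp [List.takeWhile, List.dropWhile, hb]

-- a leading zero cell merely advances B's pointer
theorem encMapRowB_zero_cons (x : Int) (cs : List Int) :
    encMapRowB x ((0:Int) :: cs) = encMapRowB (x + 1) cs := by
  rw [encMapRowB, encMapRowB_skip_zeros (x + 1) cs]
  simp

-- main row invariant: A's loop from either reachable state equals B's scanner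
theorem encMapRow_inv (row : List Int) :
    (∀ (x xe : Int) (ranges : List (Int × Int × Int)), 0 ≤ x → xe = x + row.length →
      encMapFinishA xe ((PySem.List.enumerate row x).foldl encMapStepA (ranges, -1, 0)) =
        ranges ++ encMapRowB x row) ∧
    (∀ (x xe s v : Int) (ranges : List (Int × Int × Int)), v ≠ 0 → 0 ≤ s → 0 ≤ x →
        xe = x + row.length →
      encMapFinishA xe ((PySem.List.enumerate row x).foldl encMapStepA (ranges, s, v)) =
        ranges ++ (s, x + ((row.takeWhile (· == v)).length : Int) - 1, v) ::
          encMapRowB (x + ((row.takeWhile (· == v)).length : Int)) (row.dropWhile (· == v))) := by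
  induction row with
  | nil =>
    constructor
    · intro x xe ranges _ hxe
      subst hxe
      simp [PySem.List.enumerate_nil, encMapFinishA, encMapRowB]
    · intro x xe s v ranges hv hs _ hxe
      subst hxe
      simp [PySem.List.enumerate_nil, encMapFinishA, encMapRowB, hv, hs,
        List.takeWhile, List.dropWhile]
  | cons c cs ih =>
    obtain ⟨ihP, ihQ⟩ := ih
    constructor
    · -- state (start = -1, current_value = 0)
      intro x xe ranges hx hxe
      rw [PySem.List.enumerate_cons, List.foldl_cons]
      by_cases hc : c = 0
      · subst hc
        rw [stepA_same,
          ihP (x + 1) xe ranges (by omega) (by rw [hxe, List.length_cons]; push_cast; ring),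
          encMapRowB_zero_cons]
      · rw [stepA_fresh _ _ _ hc,
          ihQ (x + 1) xe x c ranges hc hx (by omega)
            (by rw [hxe, List.length_cons]; push_cast; ring)]
        rw [encMapRowB]
        simp only [hc, ne_eq, not_false_eq_true, if_pos, List.singleton_append]
        try push_cast
        try ring_nf
    · -- state (start = s ≥ 0, current_value = v ≠ 0)
      intro x xe s v ranges hv hs hx hxe
      rw [PySem.List.enumerate_cons, List.foldl_cons]
      by_cases hcv : c = v
      · subst hcv
        rw [stepA_same,
          ihQ (x + 1) xe s c ranges hv hs (by omega)
            (by rw [hxe, List.length_cons]; push_cast; ring)]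
        simp only [List.takeWhile, List.dropWhile, beq_self_eq_true, List.length_cons]
        push_cast
        ring_nf
      · have hb : ((c == v) = false) := by simpa using hcv
        by_cases hc : c = 0
        · subst hc
          rw [stepA_close_zero _ _ _ _ hv hs,
            ihP (x + 1) xe (ranges ++ [(s, x - 1, v)]) (by omega)
              (by rw [hxe, List.length_cons]; push_cast; ring)]
          simp only [List.takeWhile, List.dropWhile, hb, List.length_nil,
            List.append_assoc, List.singleton_append, Int.natCast_zero, add_zero]
          rw [encMapRowB_zero_cons]
        · rw [stepA_close_new _ _ _ _ _ hcv hc hs,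
            ihQ (x + 1) xe x c (ranges ++ [(s, x - 1, v)]) hc hx (by omega)
              (by rw [hxe, List.length_cons]; push_cast; ring)]
          simp only [List.takeWhile, List.dropWhile, hb, List.length_nil,
            List.append_assoc, List.singleton_append, Int.natCast_zero, add_zero]
          rw [encMapRowB]
          simp only [hc, ne_eq, not_false_eq_true, if_pos, List.singleton_append]
          try push_cast
          try ring_nf

theorem encMapRowA_eq (row : List Int) : encMapRowA row = encMapRowB 0 row := by
  have h := (encMapRow_inv row).1 0 (row.length : Int) [] le_rfl (by ring)
  simpa [encMapRowA, encMapFinishA] using h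

-- ===== VERDICT (by name: the statement is the Claim_ definition above) =====
theorem encode_map_spec : Claim_equal_encode_map := by
  intro raw_map _
  unfold Spec_encode_map encode_map encode_map_alt
  congr 1
  apply List.foldl_ext
  intro d p _
  rw [encMapRowA_eq]
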